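-- pv_equiv track=rewrite | github.com/liu2333hui/OpenAIChip | generators/gen_multiplier.py | max_floating_props
-- ===== SOURCE A (Python) =====
-- def max_floating_props(analyze):
--     Ps = []
--     Es = []
--     Ms = []
--     for sign, P, E, M, PREC in analyze:
--         Ps.append(P)
--         Es.append(E)
--         Ms.append(M)
--
--     return max(Ps), max(Es), max(Ms)
-- ===== SOURCE B (Python) =====
-- def max_floating_props(analyze):
--     if not analyze:
--         raise ValueError("max_floating_props: empty sequence")
--     (sign, maxP, maxE, maxM, PREC) = analyze[0]
--     for sign, P, E, M, PREC in analyze[1:]: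
--         if P > maxP:
--             maxP = P
--         if E > maxE:
--             maxE = E
--         if M > maxM:
--             maxM = M
--     return maxP, maxE, maxM
-- ===== Notes on version B (the rewrite author's own statement) =====
-- stated objective: simpler
-- what changed: Replaces the three list-building passes followed by three max() calls with a single pass that seeds three scalar running maxima from the first tuple and updates them inline; no intermediate lists are allocated.
import Mathlib
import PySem

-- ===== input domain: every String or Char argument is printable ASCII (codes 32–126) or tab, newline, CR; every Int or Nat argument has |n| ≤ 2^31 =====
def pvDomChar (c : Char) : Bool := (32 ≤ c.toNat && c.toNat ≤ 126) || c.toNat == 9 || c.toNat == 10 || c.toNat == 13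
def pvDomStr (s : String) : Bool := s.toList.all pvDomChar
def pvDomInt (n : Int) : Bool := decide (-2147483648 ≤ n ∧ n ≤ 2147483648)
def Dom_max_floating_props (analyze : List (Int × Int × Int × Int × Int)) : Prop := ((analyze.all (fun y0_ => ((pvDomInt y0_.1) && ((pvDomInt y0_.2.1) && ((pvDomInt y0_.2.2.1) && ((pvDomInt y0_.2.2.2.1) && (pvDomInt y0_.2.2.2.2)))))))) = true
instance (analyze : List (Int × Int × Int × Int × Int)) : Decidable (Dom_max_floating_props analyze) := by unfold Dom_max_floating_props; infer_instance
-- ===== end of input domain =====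

-- ===== PORT A =====
-- Literal port of A: build three lists Ps/Es/Ms in one loop, then max() of each.
-- (.getD 0 is only reached on the empty list, which Pre_ excludes: Python raises ValueError there.)
def max_floating_props (analyze : List (Int × Int × Int × Int × Int)) : Int × Int × Int :=
  let s := analyze.foldl
    (fun (s : List Int × List Int × List Int) t =>
      (s.1 ++ [t.2.1], s.2.1 ++ [t.2.2.1], s.2.2 ++ [t.2.2.2.1]))
    ([], [], [])
  ((PySem.List.max? s.1 (fun y => y)).getD 0,
   (PySem.List.max? s.2.1 (fun y => y)).getD 0,
   (PySem.List.max? s.2.2 (fun y => y)).getD 0)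

-- ===== PORT B =====
-- Port of B: seed three scalar maxima from the first tuple, one pass of inline comparisons.
-- (The [] branch corresponds to B's ValueError on the empty list, excluded by Pre_.)
def max_floating_props_alt (analyze : List (Int × Int × Int × Int × Int)) : Int × Int × Int :=
  match analyze with
  | [] => (0, 0, 0)
  | (_, P, E, M, _) :: rest =>
    rest.foldl
      (fun m t =>
        (if t.2.1 > m.1 then t.2.1 else m.1,
         if t.2.2.1 > m.2.1 then t.2.2.1 else m.2.1,
         if t.2.2.2.1 > m.2.2 then t.2.2.2.1 else m.2.2))
      (P, E, M)

-- ===== PRECONDITION & SPEC =====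
-- Pre_ excludes only the empty list, on which A's max() raises ValueError (B raises too).
def Pre_max_floating_props (analyze : List (Int × Int × Int × Int × Int)) : Prop :=
  analyze ≠ []
instance (analyze : List (Int × Int × Int × Int × Int)) : Decidable (Pre_max_floating_props analyze) := by
  unfold Pre_max_floating_props; infer_instance
def pvWitness_max_floating_props : (List (Int × Int × Int × Int × Int)) := [(0, 1, 2, 3, 4), (1, 5, 0, 2, 4)]
def Spec_max_floating_props (analyze : List (Int × Int × Int × Int × Int)) (out : Int × Int × Int) : Prop := out = max_floating_props_alt analyze
instance (analyze : List (Int × Int × Int × Int × Int)) (out : Int × Int × Int) : Decidable (Spec_max_floating_props analyze out) := by unfold Spec_max_floating_props; infer_instance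

-- ===== CLAIM (what is proved, stated in full; the proofs are below) =====
def Claim_equal_max_floating_props : Prop := ∀ (analyze : List (Int × Int × Int × Int × Int)), Dom_max_floating_props analyze → Pre_max_floating_props analyze → Spec_max_floating_props analyze (max_floating_props analyze)

-- ===== LEMMAS AND PROOFS =====

lemma pv_if_gt_eq_max (a b : Int) : (if b > a then b else a) = max a b := by
  simp [max_def]; split_ifs <;> omega

-- A's loop appends the three projections; with accumulators generalized it is three maps.
lemma pv_foldA (l : List (Int × Int × Int × Int × Int)) (a b c : List Int) :
    l.foldl
      (fun (s : List Int × List Int × List Int) t =>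
        (s.1 ++ [t.2.1], s.2.1 ++ [t.2.2.1], s.2.2 ++ [t.2.2.2.1]))
      (a, b, c)
    = (a ++ l.map (fun t => t.2.1), b ++ l.map (fun t => t.2.2.1), c ++ l.map (fun t => t.2.2.2.1)) := by
  induction l generalizing a b c with
  | nil => simp
  | cons h t ih => simp [List.foldl_cons, ih]

-- B's triple fold is the triple of running maxima.
lemma pv_foldB (l : List (Int × Int × Int × Int × Int)) (p e m : Int) :
    l.foldl
      (fun m t =>
        (if t.2.1 > m.1 then t.2.1 else m.1,
         if t.2.2.1 > m.2.1 then t.2.2.1 else m.2.1,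
         if t.2.2.2.1 > m.2.2 then t.2.2.2.1 else m.2.2))
      (p, e, m)
    = (l.foldl (fun a t => max a t.2.1) p,
       l.foldl (fun a t => max a t.2.2.1) e,
       l.foldl (fun a t => max a t.2.2.2.1) m) := by
  induction l generalizing p e m with
  | nil => rfl
  | cons h t ih => rw [List.foldl_cons, ih]; simp only [pv_if_gt_eq_max, List.foldl_cons]

-- ===== VERDICT (by name: the statement is the Claim_ definition above) =====
theorem max_floating_props_spec : Claim_equal_max_floating_props := by
  intro analyze _dom hpre
  unfold Spec_max_floating_props
  match analyze with
  | [] => exact absurd rfl hpre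
  | (s0, P, E, M, pr) :: rest =>
    show max_floating_props _ = _
    simp only [max_floating_props, max_floating_props_alt, pv_foldA, pv_foldB,
      List.nil_append, List.map_cons, PySem.List.max?_id_cons, Option.getD_some,
      List.foldl_map]
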